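-- pv_equiv track=rewrite | github.com/maddest-scientists/dbt-snowplow-normalize | utils/functions/snowplow_model_gen_utils.py | get_leafs
-- ===== SOURCE A (Python) =====
-- def get_leafs(paths):
--     paths = sorted(paths, key=len)
--     leafs = []
--
--     for index, current in enumerate(paths):
--         if any([other.startswith(current) for other in paths[index+1:]]):
--             continue
--
--         leafs.append(current)
--
--     return leafs
-- ===== SOURCE B (Python) =====
-- def get_leafs(paths):
--     # Mark every strict prefix of any path once, then keep the last occurrence
--     # (in stable length order) of each unmarked path.
--     pruned = set()
--     for t in paths:
--         for i in range(len(t)):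
--             pruned.add(t[:i])
--     out = []
--     seen = set()
--     for s in reversed(sorted(paths, key=len)):
--         if s not in pruned and s not in seen:
--             seen.add(s)
--             out.append(s)
--     return out[::-1]
-- ===== Notes on version B (the rewrite author's own statement) =====
-- stated objective: faster
-- what changed: Replaces A's quadratic per-element scan of all later paths with a one-pass hash set of every strict prefix of every path, plus a reverse pass that keeps the last occurrence of each unmarked path.
import Mathlib
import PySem

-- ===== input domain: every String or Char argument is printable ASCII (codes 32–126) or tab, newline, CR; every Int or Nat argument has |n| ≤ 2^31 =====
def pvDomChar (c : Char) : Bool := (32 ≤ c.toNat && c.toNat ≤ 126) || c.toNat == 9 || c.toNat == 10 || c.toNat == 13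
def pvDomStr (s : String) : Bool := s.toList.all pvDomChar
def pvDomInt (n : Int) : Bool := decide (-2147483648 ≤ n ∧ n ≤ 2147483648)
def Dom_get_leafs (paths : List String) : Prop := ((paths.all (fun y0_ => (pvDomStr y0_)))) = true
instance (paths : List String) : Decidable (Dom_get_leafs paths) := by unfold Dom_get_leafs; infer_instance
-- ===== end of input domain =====

-- B replaces A's per-element scan of all later paths with a set of all strict prefixes
-- built in one pass, plus a reverse pass keeping last occurrences of unmarked paths.


-- ===== PORT A =====
-- the for-loop over enumerate(paths): at index i, paths[i+1:] is exactly the remaining suffix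
def getLeafsGo : List String → List String
  | [] => []
  | c :: rest =>
    if rest.any (fun other => PySem.Str.startswith other c) then getLeafsGo rest
    else c :: getLeafsGo rest

def get_leafs (paths : List String) : List String :=
  getLeafsGo (PySem.List.sorted paths (fun s => PySem.Str.len s) false)

-- ===== PORT B =====
-- pruned = the set of t[:i] for every path t and every 0 <= i < len(t)
def altPruned (paths : List String) : PySem.Set String :=
  paths.foldl
    (fun pr t =>
      (PySem.List.pyRange 0 (PySem.Str.len t) 1).foldl
        (fun pr i => PySem.Set.add pr (PySem.Str.slice t none (some i))) pr)
    PySem.Set.empty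

def get_leafs_alt (paths : List String) : List String :=
  let pruned := altPruned paths
  let r := (PySem.List.sorted paths (fun s => PySem.Str.len s) false).reverse.foldl
    (fun (acc : List String × PySem.Set String) s =>
      if ¬ (PySem.Set.contains pruned s = true) ∧ ¬ (PySem.Set.contains acc.2 s = true) then
        (acc.1 ++ [s], PySem.Set.add acc.2 s)
      else acc)
    ([], PySem.Set.empty)
  r.1.reverse

-- ===== PRECONDITION & SPEC =====
def Spec_get_leafs (paths : List String) (out : List String) : Prop := out = get_leafs_alt paths
instance (paths : List String) (out : List String) : Decidable (Spec_get_leafs paths out) := by unfold Spec_get_leafs; infer_instance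

-- ===== CLAIM (what is proved, stated in full; the proofs are below) =====
def Claim_equal_get_leafs : Prop := ∀ (paths : List String), Dom_get_leafs paths → Spec_get_leafs paths (get_leafs paths)

-- ===== LEMMAS AND PROOFS =====
def IsStrictPrefix (paths : List String) (c : String) : Prop :=
  ∃ t ∈ paths, c.toList <+: t.toList ∧ c.toList.length < t.toList.length

lemma mem_foldl_of_step {α β : Type} [BEq α] (P : β → α → Prop)
    (step : PySem.Set α → β → PySem.Set α)
    (hstep : ∀ pr t y, y ∈ step pr t ↔ y ∈ pr ∨ P t y) :
    ∀ (l : List β) (s : PySem.Set α) (y : α),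
      y ∈ l.foldl step s ↔ y ∈ s ∨ ∃ t ∈ l, P t y := by
  intro l
  induction l with
  | nil => simp
  | cons t l ih =>
    intro s y
    simp only [List.foldl_cons, ih, hstep, List.mem_cons]
    constructor
    · rintro ((h | h) | ⟨u, hu, hp⟩)
      · exact Or.inl h
      · exact Or.inr ⟨t, Or.inl rfl, h⟩
      · exact Or.inr ⟨u, Or.inr hu, hp⟩
    · rintro (h | ⟨u, (rfl | hu), hp⟩)
      · exact Or.inl (Or.inl h)
      · exact Or.inl (Or.inr hp)
      · exact Or.inr ⟨u, hu, hp⟩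

lemma exists_slice_iff (t y : String) :
    (∃ i ∈ PySem.List.pyRange 0 (PySem.Str.len t) 1, y = PySem.Str.slice t none (some i)) ↔
      (y.toList <+: t.toList ∧ y.toList.length < t.toList.length) := by
  constructor
  · rintro ⟨i, hi, rfl⟩
    rw [PySem.List.mem_pyRange_one] at hi
    have h0 : (0:Int) ≤ i := hi.1
    have hlt : i < PySem.Str.len t := hi.2
    have hts : (PySem.Str.slice t none (some i)).toList = t.toList.take i.toNat := by
      rw [PySem.Str.toList_slice, PySem.Chars.slice_eq_listSlice, PySem.List.slice_to _ h0]
    rw [hts]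
    refine ⟨List.take_prefix _ _, ?_⟩
    have hl := PySem.Str.len_eq t
    simp only [List.length_take]; omega
  · rintro ⟨hp, hlen⟩
    refine ⟨(y.toList.length : Int), ?_, ?_⟩
    · rw [PySem.List.mem_pyRange_one]
      have hl := PySem.Str.len_eq t
      constructor <;> omega
    · apply String.toList_inj.mp
      rw [PySem.Str.toList_slice, PySem.Chars.slice_eq_listSlice,
          PySem.List.slice_to _ (by positivity)]
      simp
      exact (List.prefix_iff_eq_take.mp hp)

lemma mem_altPruned (paths : List String) (c : String) :
    PySem.Set.contains (altPruned paths) c = true ↔ IsStrictPrefix paths c := by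
  rw [PySem.Set.contains_iff]
  unfold altPruned
  rw [mem_foldl_of_step
      (fun t y => ∃ i ∈ PySem.List.pyRange 0 (PySem.Str.len t) 1, y = PySem.Str.slice t none (some i))
      _ ?_]
  · simp only [IsStrictPrefix]
    constructor
    · rintro (h | ⟨t, ht, hp⟩)
      · cases h
      · exact ⟨t, ht, (exists_slice_iff t c).mp hp⟩
    · rintro ⟨t, ht, hp⟩
      exact Or.inr ⟨t, ht, (exists_slice_iff t c).mpr hp⟩
  · intro pr t y
    exact mem_foldl_of_step (fun i y => y = PySem.Str.slice t none (some i)) _ (by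
      intro pr i y; rw [PySem.Set.mem_add]) _ pr y

def PathsInv (paths : List String) (l : List String) : Prop :=
  l.Pairwise (fun a b => a.toList.length ≤ b.toList.length) ∧
  (∀ s ∈ l, s ∈ paths) ∧
  (∀ s ∈ l, ∀ t ∈ paths, s.toList.length < t.toList.length → s.toList <+: t.toList → t ∈ l)

lemma pinv_tail {paths : List String} {c : String} {rest : List String}
    (h : PathsInv paths (c :: rest)) : PathsInv paths rest := by
  obtain ⟨hpw, hmem, hcl⟩ := h
  rw [List.pairwise_cons] at hpw
  refine ⟨hpw.2, fun s hs => hmem s (List.mem_cons_of_mem _ hs), ?_⟩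
  intro s hs t ht hlt hp
  rcases List.mem_cons.mp (hcl s (List.mem_cons_of_mem _ hs) t ht hlt hp) with h | h
  · subst h; exact absurd (hpw.1 s hs) (by omega)
  · exact h

lemma any_iff {paths : List String} {c : String} {rest : List String}
    (h : PathsInv paths (c :: rest)) :
    (rest.any (fun other => PySem.Str.startswith other c) = true) ↔
      (IsStrictPrefix paths c ∨ c ∈ rest) := by
  obtain ⟨hpw, hmem, hcl⟩ := h
  rw [List.any_eq_true]
  constructor
  · rintro ⟨t, ht, hsw⟩
    rw [PySem.Str.startswith_eq, PySem.Chars.startswith_iff] at hsw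
    by_cases hlen : c.toList.length < t.toList.length
    · exact Or.inl ⟨t, hmem t (List.mem_cons_of_mem _ ht), hsw, hlen⟩
    · have : c.toList = t.toList :=
        List.IsPrefix.eq_of_length hsw (by have := hsw.length_le; omega)
      have : c = t := String.toList_inj.mp this
      subst this
      exact Or.inr ht
  · rintro (⟨t, ht, hp, hlen⟩ | hc)
    · have htl := hcl c List.mem_cons_self t ht hlen hp
      rcases List.mem_cons.mp htl with h | h
      · subst h; omega
      · exact ⟨t, h, by rw [PySem.Str.startswith_eq, PySem.Chars.startswith_iff]; exact hp⟩
    · exact ⟨c, hc, by rw [PySem.Str.startswith_eq, PySem.Chars.startswith_iff]⟩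

lemma fold_main (paths : List String) (l : List String) (h : PathsInv paths l) :
    ∃ S : PySem.Set String,
      l.reverse.foldl
        (fun (acc : List String × PySem.Set String) s =>
          if ¬ (PySem.Set.contains (altPruned paths) s = true) ∧ ¬ (PySem.Set.contains acc.2 s = true) then
            (acc.1 ++ [s], PySem.Set.add acc.2 s)
          else acc)
        ([], PySem.Set.empty)
      = ((getLeafsGo l).reverse, S) ∧
      (∀ x, PySem.Set.contains S x = true ↔ (x ∈ l ∧ ¬ IsStrictPrefix paths x)) := by
  induction l with
  | nil => exact ⟨PySem.Set.empty, rfl, by simp [PySem.Set.empty]⟩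
  | cons c rest ih =>
    obtain ⟨S, hS, hSm⟩ := ih (pinv_tail h)
    rw [List.reverse_cons, List.foldl_append, hS]
    simp only [List.foldl_cons, List.foldl_nil]
    by_cases hkeep : ¬ (PySem.Set.contains (altPruned paths) c = true) ∧ ¬ (PySem.Set.contains S c = true)
    · rw [if_pos hkeep]
      have hnp : ¬ IsStrictPrefix paths c := fun hp => hkeep.1 ((mem_altPruned paths c).mpr hp)
      have hnr : c ∉ rest := fun hr => hkeep.2 ((hSm c).mpr ⟨hr, hnp⟩)
      have hgo : getLeafsGo (c :: rest) = c :: getLeafsGo rest := by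
        rw [getLeafsGo, if_neg]
        rw [any_iff h]
        tauto
      refine ⟨PySem.Set.add S c, ?_, ?_⟩
      · rw [hgo, List.reverse_cons]
      · intro x
        rw [PySem.Set.contains_iff, PySem.Set.mem_add, ← PySem.Set.contains_iff, List.mem_cons]
        constructor
        · rintro (hx | rfl)
          · have hx' := (hSm x).mp hx
            exact ⟨Or.inr hx'.1, hx'.2⟩
          · exact ⟨Or.inl rfl, hnp⟩
        · rintro ⟨(rfl | hx), hnpx⟩
          · exact Or.inr rfl
          · exact Or.inl ((hSm x).mpr ⟨hx, hnpx⟩)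
    · rw [if_neg hkeep]
      have hdrop : PySem.Set.contains (altPruned paths) c = true ∨ PySem.Set.contains S c = true := by
        tauto
      have hgo : getLeafsGo (c :: rest) = getLeafsGo rest := by
        rw [getLeafsGo, if_pos]
        rw [any_iff h]
        rcases hdrop with h' | h'
        · exact Or.inl ((mem_altPruned paths c).mp h')
        · exact Or.inr ((hSm c).mp h').1
      refine ⟨S, by rw [hgo], ?_⟩
      intro x
      rw [hSm x, List.mem_cons]
      constructor
      · rintro ⟨hx, hnpx⟩; exact ⟨Or.inr hx, hnpx⟩
      · rintro ⟨(rfl | hx), hnpx⟩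
        · rcases hdrop with h' | h'
          · exact absurd ((mem_altPruned paths x).mp h') hnpx
          · exact ⟨((hSm x).mp h').1, hnpx⟩
        · exact ⟨hx, hnpx⟩

theorem main_eq (paths : List String) : get_leafs paths = get_leafs_alt paths := by
  have hinv : PathsInv paths (PySem.List.sorted paths (fun s => PySem.Str.len s) false) := by
    refine ⟨?_, ?_, ?_⟩
    · have hpw := PySem.List.sorted_pairwise paths (fun s => PySem.Str.len s)
      refine hpw.imp ?_
      intro a b hab
      have ha := PySem.Str.len_eq a
      have hb := PySem.Str.len_eq b
      simp only at hab
      omega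
    · intro s hs
      exact (PySem.List.mem_sorted _ _ _ _).mp hs
    · intro s _ t ht _ _
      exact (PySem.List.mem_sorted _ _ _ _).mpr ht
  obtain ⟨S, hS, -⟩ := fold_main paths _ hinv
  show getLeafsGo _ = _
  unfold get_leafs_alt
  simp only [hS, List.reverse_reverse]

-- ===== VERDICT (by name: the statement is the Claim_ definition above) =====
theorem get_leafs_spec : Claim_equal_get_leafs := by
  intro paths _
  unfold Spec_get_leafs
  exact main_eq paths
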